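-- pv_equiv track=rewrite | github.com/JoshiMinh/movie-recommender-dl | src/dataset.py | _build_samples
-- ===== SOURCE A (Python) =====
-- from typing import Dict, List, Tuple
--
-- def _pad_sequence(seq: List[int], max_seq_len: int) -> List[int]:
--     if len(seq) > max_seq_len:
--         seq = seq[-max_seq_len:]
--     padding = [0] * (max_seq_len - len(seq))
--     return padding + seq
--
-- def _build_samples(
--     user_items: List[int], max_seq_len: int
-- ) -> Tuple[List[List[int]], List[int], List[List[int]], List[int], List[List[int]], List[int]]:
--     train_x: List[List[int]] = []
--     train_y: List[int] = []
--     val_x: List[List[int]] = []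
--     val_y: List[int] = []
--     test_x: List[List[int]] = []
--     test_y: List[int] = []
--
--     n = len(user_items)
--     if n < 4:
--         return train_x, train_y, val_x, val_y, test_x, test_y
--
--     # Train on all but last two targets; reserve final two for val/test.
--     for t in range(1, n - 2):
--         seq = user_items[:t]
--         train_x.append(_pad_sequence(seq, max_seq_len))
--         train_y.append(user_items[t])
--
--     val_t = n - 2
--     val_x.append(_pad_sequence(user_items[:val_t], max_seq_len))
--     val_y.append(user_items[val_t])
--
--     test_t = n - 1
--     test_x.append(_pad_sequence(user_items[:test_t], max_seq_len))
--     test_y.append(user_items[test_t])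
--
--     return train_x, train_y, val_x, val_y, test_x, test_y
-- ===== SOURCE B (Python) =====
-- def _build_samples(user_items, max_seq_len):
--     n = len(user_items)
--     if n < 4:
--         return [], [], [], [], [], []
--     # Single forward pass with a rolling fixed-width window accumulator:
--     # each step records the current window, then shifts the new item in.
--     window = [0] * max_seq_len
--     xs = []
--     for x in user_items:
--         xs.append(window)
--         window = (window + [x])[1:]
--     return (xs[1:n - 2], user_items[1:n - 2],
--             [xs[n - 2]], [user_items[n - 2]],
--             [xs[n - 1]], [user_items[n - 1]])
-- ===== Notes on version B (the rewrite author's own statement) =====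
-- stated objective: alternative
-- what changed: Replaces per-sample prefix slicing plus a padding helper with a single forward pass that maintains a rolling fixed-width window accumulator (record window, shift the new item in), then reads train/val/test samples off the collected window list.
-- intended difference: For histories of length n >= 4 with a meaningless non-positive window width max_seq_len in [2-n, 0], A returns accidental unpadded front-truncated prefixes produced by its seq[-max_seq_len:] slice, while B's rolling window is simply empty there, the consistent reading of a window width <= 0. — e.g. on _build_samples([0, 0, 0, 0], 0): A returns ([[0]], [0], [[0, 0]], [0], [[0, 0, 0]], [0]), B returns ([[]], [0], [[]], [0], [[]], [0])
import Mathlib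
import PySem

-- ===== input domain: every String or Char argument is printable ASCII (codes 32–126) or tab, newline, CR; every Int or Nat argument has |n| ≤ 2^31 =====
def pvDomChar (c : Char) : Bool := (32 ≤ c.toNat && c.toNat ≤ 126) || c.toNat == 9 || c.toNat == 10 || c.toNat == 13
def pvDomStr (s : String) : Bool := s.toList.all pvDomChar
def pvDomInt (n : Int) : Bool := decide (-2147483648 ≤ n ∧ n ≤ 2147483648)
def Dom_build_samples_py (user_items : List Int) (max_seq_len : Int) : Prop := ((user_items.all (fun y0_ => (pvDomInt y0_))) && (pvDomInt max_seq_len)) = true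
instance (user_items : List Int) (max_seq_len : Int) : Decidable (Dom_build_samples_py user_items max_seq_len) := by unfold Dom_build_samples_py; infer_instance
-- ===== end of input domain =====

-- B replaces A's per-sample prefix slicing + padding helper with a single forward
-- pass maintaining a rolling fixed-width window accumulator (alternative decomposition).

-- ===== PORT A =====
def pad_sequence (seq : List Int) (max_seq_len : Int) : List Int :=
  let seq := if (seq.length : Int) > max_seq_len
    then PySem.List.slice seq (some (-max_seq_len)) none else seq
  let padding := PySem.List.pyRepeat [(0 : Int)] (max_seq_len - (seq.length : Int))
  padding ++ seq

def build_samples_py (user_items : List Int) (max_seq_len : Int) : List (List Int) × List Int × List (List Int) × List Int × List (List Int) × List Int :=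
  let n : Int := user_items.length
  if n < 4 then ([], [], [], [], [], []) else
  let tr := (PySem.List.pyRange 1 (n - 2) 1).foldl
    (fun (acc : List (List Int) × List Int) t =>
      (acc.1 ++ [pad_sequence (PySem.List.slice user_items none (some t)) max_seq_len],
       acc.2 ++ [PySem.List.pyGetD user_items t 0])) ([], [])
  let val_t := n - 2
  let val_x := [pad_sequence (PySem.List.slice user_items none (some val_t)) max_seq_len]
  let val_y := [PySem.List.pyGetD user_items val_t 0]
  let test_t := n - 1
  let test_x := [pad_sequence (PySem.List.slice user_items none (some test_t)) max_seq_len]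
  let test_y := [PySem.List.pyGetD user_items test_t 0]
  (tr.1, tr.2, val_x, val_y, test_x, test_y)

-- ===== PORT B =====
def build_samples_py_alt (user_items : List Int) (max_seq_len : Int) : List (List Int) × List Int × List (List Int) × List Int × List (List Int) × List Int :=
  let n : Int := user_items.length
  if n < 4 then ([], [], [], [], [], []) else
  let st := user_items.foldl
    (fun (acc : List Int × List (List Int)) x =>
      (PySem.List.slice (acc.1 ++ [x]) (some 1) none, acc.2 ++ [acc.1]))
    (PySem.List.pyRepeat [(0 : Int)] max_seq_len, [])
  let xs := st.2
  (PySem.List.slice xs (some 1) (some (n - 2)),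
   PySem.List.slice user_items (some 1) (some (n - 2)),
   [PySem.List.pyGetD xs (n - 2) []],
   [PySem.List.pyGetD user_items (n - 2) 0],
   [PySem.List.pyGetD xs (n - 1) []],
   [PySem.List.pyGetD user_items (n - 1) 0])

-- ===== PRECONDITION & SPEC =====
-- For histories of length n ≥ 4 with a meaningless non-positive window width
-- max_seq_len in [2-n, 0], A returns accidental unpadded front-truncated prefixes
-- produced by its seq[-max_seq_len:] slice, while B's rolling window is simply
-- empty there, the consistent reading of a window width ≤ 0.
def D_build_samples_py (user_items : List Int) (max_seq_len : Int) : Prop :=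
  4 ≤ user_items.length ∧ max_seq_len ≤ 0 ∧ 2 - (user_items.length : Int) ≤ max_seq_len
instance (user_items : List Int) (max_seq_len : Int) : Decidable (D_build_samples_py user_items max_seq_len) := by unfold D_build_samples_py; infer_instance

def Spec_build_samples_py (user_items : List Int) (max_seq_len : Int) (out : List (List Int) × List Int × List (List Int) × List Int × List (List Int) × List Int) : Prop := ¬ D_build_samples_py user_items max_seq_len → out = build_samples_py_alt user_items max_seq_len
instance (user_items : List Int) (max_seq_len : Int) (out : List (List Int) × List Int × List (List Int) × List Int × List (List Int) × List Int) : Decidable (Spec_build_samples_py user_items max_seq_len out) := by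
  unfold Spec_build_samples_py
  letI i2 : DecidableEq (List (List Int) × List Int) := instDecidableEqProd
  letI i3 : DecidableEq (List Int × List (List Int) × List Int) := instDecidableEqProd
  letI i4 : DecidableEq (List (List Int) × List Int × List (List Int) × List Int) := instDecidableEqProd
  letI i5 : DecidableEq (List Int × List (List Int) × List Int × List (List Int) × List Int) := instDecidableEqProd
  letI i6 : DecidableEq (List (List Int) × List Int × List (List Int) × List Int × List (List Int) × List Int) := instDecidableEqProd
  infer_instance

def pvDiffWitness_build_samples_py : List Int × Int := ([0, 0, 0, 0], 0)
def pvDiffWitnessOut_build_samples_py : (List (List Int) × List Int × List (List Int) × List Int × List (List Int) × List Int) × (List (List Int) × List Int × List (List Int) × List Int × List (List Int) × List Int) :=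
  (([[0]], [0], [[0, 0]], [0], [[0, 0, 0]], [0]), ([[]], [0], [[]], [0], [[]], [0]))

-- ===== CLAIM (what is proved, stated in full; the proofs are below) =====
def Claim_unchanged_build_samples_py : Prop := ∀ (user_items : List Int) (max_seq_len : Int), Dom_build_samples_py user_items max_seq_len → Spec_build_samples_py user_items max_seq_len (build_samples_py user_items max_seq_len)
def Claim_changed_build_samples_py : Prop := Dom_build_samples_py (pvDiffWitness_build_samples_py.1) (pvDiffWitness_build_samples_py.2) ∧ D_build_samples_py (pvDiffWitness_build_samples_py.1) (pvDiffWitness_build_samples_py.2) ∧ build_samples_py (pvDiffWitness_build_samples_py.1) (pvDiffWitness_build_samples_py.2) = pvDiffWitnessOut_build_samples_py.1 ∧ build_samples_py_alt (pvDiffWitness_build_samples_py.1) (pvDiffWitness_build_samples_py.2) = pvDiffWitnessOut_build_samples_py.2 ∧ pvDiffWitnessOut_build_samples_py.1 ≠ pvDiffWitnessOut_build_samples_py.2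
def Claim_exact_build_samples_py : Prop := ∀ (user_items : List Int) (max_seq_len : Int), Dom_build_samples_py user_items max_seq_len → D_build_samples_py user_items max_seq_len → build_samples_py user_items max_seq_len ≠ build_samples_py_alt user_items max_seq_len

-- ===== LEMMAS AND PROOFS =====

-- the sequence of windows B's rolling-window loop records
def winList (w : List Int) : List Int → List (List Int)
  | [] => []
  | x :: l => w :: winList ((w ++ [x]).tail) l

-- the fixed-width window of the pre-padded master list at position t
def winf (xs : List Int) (m t : Nat) : List Int :=
  ((List.replicate m (0 : Int) ++ xs).drop t).take m

theorem foldB_snd (l : List Int) : ∀ (w : List Int) (a : List (List Int)),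
    (l.foldl (fun (acc : List Int × List (List Int)) x =>
      (PySem.List.slice (acc.1 ++ [x]) (some 1) none, acc.2 ++ [acc.1])) (w, a)).2
      = a ++ winList w l := by
  induction l with
  | nil => intro w a; simp [winList]
  | cons x l ih =>
      intro w a
      rw [List.foldl_cons, ih, PySem.List.slice_from_one]
      simp [winList]

theorem winList_spec (xs : List Int) (m : Nat) : ∀ (k t : Nat), t + k = xs.length →
    winList (winf xs m t) (xs.drop t) = (List.range k).map (fun i => winf xs m (t + i)) := by
  intro k
  induction k with
  | zero =>
      intro t ht
      rw [List.drop_eq_nil_of_le (by omega)]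
      simp [winList]
  | succ k ih =>
      intro t ht
      have htn : t < xs.length := by omega
      rw [List.drop_eq_getElem_cons htn]
      simp only [winList]
      have hstep : ((winf xs m t) ++ [xs[t]]).tail = winf xs m (t + 1) := by
        have hP : (List.replicate m (0 : Int) ++ xs).length = m + xs.length := by simp
        have hQ : ((List.replicate m (0 : Int) ++ xs).drop t).length = m + xs.length - t := by
          simp [List.length_drop, List.length_append, List.length_replicate]
        have hmQ : m < ((List.replicate m (0 : Int) ++ xs).drop t).length := by rw [hQ]; omega
        have hx : xs[t] = ((List.replicate m (0 : Int) ++ xs).drop t)[m]'hmQ := by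
          rw [List.getElem_drop]
          rw [List.getElem_append_right (by simp only [List.length_replicate]; omega)]
          congr 1
          simp only [List.length_replicate]
          omega
        rw [hx]
        unfold winf
        rw [← List.take_succ_eq_append_getElem hmQ]
        rw [← List.drop_one, List.drop_take, List.drop_drop]
        norm_num
      rw [hstep, ih (t + 1) (by omega)]
      rw [List.range_succ_eq_map]
      simp only [List.map_cons, List.map_map]
      refine congrArg₂ _ (by simp [winf]) (List.map_congr_left fun i _ => ?_)
      simp only [Function.comp]
      congr 1
      omega

theorem take_drop_map_range (f : Nat → List Int) (n j : Nat) (hj : j + 1 ≤ n) :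
    (((List.range n).map f).drop 1).take j = (List.range j).map (fun k => f (1 + k)) := by
  apply List.ext_getElem
  · simp
    omega
  · intro k h1 h2
    simp [List.getElem_take, List.getElem_map, List.getElem_range]
    congr 1
    omega

-- A's padded/truncated prefix of length t equals B's fixed-width window [t, t+m)
-- of the pre-padded master array, for positive width m.
theorem pad_eq_window (xs : List Int) (m t : Nat) (hm : 1 ≤ m) (ht : t ≤ xs.length) :
    pad_sequence (xs.take t) (m : Int)
      = PySem.List.slice (List.replicate m (0 : Int) ++ xs) (some (t : Int)) (some ((t : Int) + (m : Int))) := by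
  have hlen : (xs.take t).length = t := by simp [List.length_take, Nat.min_eq_left ht]
  rw [PySem.List.slice_natCast_add]
  by_cases h : t ≤ m
  · simp only [pad_sequence, hlen]
    rw [if_neg (by omega), hlen]
    have e1 : ((m : Int) - (t : Int)) = ((m - t : Nat) : Int) := by omega
    rw [e1, PySem.List.pyRepeat_singleton, Int.toNat_natCast]
    rw [List.drop_append, List.take_append]
    simp [List.drop_replicate, List.take_replicate, Nat.sub_eq_zero_of_le h,
      Nat.sub_sub_self h]
  · rw [not_le] at h
    simp only [pad_sequence, hlen]
    rw [if_pos (by omega)]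
    rw [PySem.List.slice_from_neg_natCast _ _ hm]
    have hdlen : (((xs.take t).drop ((xs.take t).length - m)).length : Int) = (m : Int) := by
      simp [List.length_drop, hlen]; omega
    rw [hdlen]
    simp only [sub_self, PySem.List.pyRepeat_singleton, Int.toNat_zero, List.replicate_zero,
      List.nil_append, hlen]
    rw [List.drop_take, List.drop_append]
    simp [List.drop_replicate, Nat.sub_eq_zero_of_le (le_of_lt h), List.length_replicate]
    rw [Nat.sub_sub_self (le_of_lt h)]

theorem pad_eq_winf (xs : List Int) (m t : Nat) (hm : 1 ≤ m) (ht : t ≤ xs.length) :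
    pad_sequence (xs.take t) (m : Int) = winf xs m t := by
  rw [pad_eq_window xs m t hm ht]
  have : ((t : Int) + (m : Int)) = (((t + m : Nat)) : Int) := by omega
  rw [this, PySem.List.slice_toNat _ (by omega) (by omega)]
  simp only [Int.toNat_natCast, winf]
  congr 1
  omega

-- When (k:Int) + max_seq_len ≤ 0 (with 1 ≤ k), A's padded prefix of length k is empty.
theorem padA_empty (xs : List Int) (msl : Int) (k : Nat) (hk1 : 1 ≤ k) (hk : k ≤ xs.length)
    (hm : (k : Int) + msl ≤ 0) : pad_sequence (xs.take k) msl = [] := by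
  have hlen : (xs.take k).length = k := by simp [List.length_take, Nat.min_eq_left hk]
  simp only [pad_sequence, hlen]
  rw [if_pos (by omega), PySem.List.slice_from _ (by omega)]
  have hd : (xs.take k).drop ((-msl).toNat) = [] :=
    List.drop_eq_nil_of_le (by rw [hlen]; omega)
  rw [hd]
  simp [PySem.List.pyRepeat_singleton]
  omega

-- A's per-t train labels are B's one slice user_items[1:n-2].
theorem train_y_eq (xs : List Int) (h4 : ¬ (xs.length : Int) < 4) :
    List.map (fun t => PySem.List.pyGetD xs t 0) (PySem.List.pyRange 1 ((xs.length : Int) - 2) 1)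
      = PySem.List.slice xs (some 1) (some ((xs.length : Int) - 2)) := by
  have hN : 4 ≤ xs.length := by omega
  have hl : ((xs.take (xs.length - 2)).length : Int) = (xs.length : Int) - 2 := by
    simp [List.length_take]; omega
  have key := PySem.List.map_pyGetD_pyRange' (xs := xs.take (xs.length - 2)) (a := 1)
    (d := 0) (by omega)
  rw [hl] at key
  rw [List.map_congr_left (l := PySem.List.pyRange 1 ((xs.length : Int) - 2) 1)
    (f := fun t => PySem.List.pyGetD xs t 0)
    (g := fun t => PySem.List.pyGetD (xs.take (xs.length - 2)) t 0) ?_, key]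
  · rw [PySem.List.slice_toNat xs (by omega) (by omega), List.drop_take]
    norm_num
    congr 1
    omega
  · intro t htmem
    rw [PySem.List.mem_pyRange_one] at htmem
    obtain ⟨k, rfl⟩ : ∃ k : Nat, t = (k : Nat) := ⟨t.toNat, by omega⟩
    simp only [PySem.List.pyGetD_natCast]
    rw [List.getD_eq_getElem?_getD, List.getD_eq_getElem?_getD, List.getElem?_take,
      if_pos (by omega)]

-- B's recorded window list, in closed form.
theorem xsL_eq (xs : List Int) (msl : Int) :
    (xs.foldl (fun (acc : List Int × List (List Int)) x =>
      (PySem.List.slice (acc.1 ++ [x]) (some 1) none, acc.2 ++ [acc.1]))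
      (PySem.List.pyRepeat [(0 : Int)] msl, [])).2
      = (List.range xs.length).map (fun i => winf xs msl.toNat i) := by
  rw [foldB_snd, List.nil_append]
  have h0 : PySem.List.pyRepeat [(0 : Int)] msl = winf xs msl.toNat 0 := by
    rw [PySem.List.pyRepeat_singleton]
    unfold winf
    rw [List.drop_zero, List.take_left']
    simp
  rw [h0]
  have := winList_spec xs msl.toNat xs.length 0 (by omega)
  rw [List.drop_zero] at this
  rw [this]
  simp

theorem build_samples_eq (xs : List Int) (msl : Int)
    (hpre : 1 ≤ msl ∨ (xs.length : Int) < 4 ∨ msl + (xs.length : Int) ≤ 1) :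
    build_samples_py xs msl = build_samples_py_alt xs msl := by
  by_cases h4 : (xs.length : Int) < 4
  · simp only [build_samples_py, build_samples_py_alt, if_pos h4]
  · have hN : 4 ≤ xs.length := by omega
    simp only [build_samples_py, build_samples_py_alt, if_neg h4]
    rw [PySem.List.foldl_prod_mk
      (f := fun a t => a ++ [pad_sequence (PySem.List.slice xs none (some t)) msl])
      (g := fun a t => a ++ [PySem.List.pyGetD xs t 0])]
    rw [PySem.List.foldl_append_singleton_eq_map, PySem.List.foldl_append_singleton_eq_map]
    rw [xsL_eq]
    have e2 : ((xs.length : Int) - 2) = ((xs.length - 2 : Nat) : Int) := by omega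
    have e1 : ((xs.length : Int) - 1) = ((xs.length - 1 : Nat) : Int) := by omega
    simp only [Prod.mk.injEq, List.nil_append]
    have hval_x : ∀ (k : Nat), k < xs.length →
        PySem.List.pyGetD ((List.range xs.length).map (fun i => winf xs msl.toNat i))
          ((k : Nat) : Int) [] = winf xs msl.toNat k := by
      intro k hk
      rw [PySem.List.pyGetD_natCast, List.getD_eq_getElem?_getD, List.getElem?_map,
        List.getElem?_range hk]
      rfl
    have hslice : PySem.List.slice ((List.range xs.length).map (fun i => winf xs msl.toNat i))
        (some 1) (some ((xs.length : Int) - 2))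
        = (List.range (xs.length - 3)).map (fun k => winf xs msl.toNat (1 + k)) := by
      rw [PySem.List.slice_toNat _ (by omega) (by omega)]
      have h1 : (1 : Int).toNat = 1 := rfl
      have h2 : ((xs.length : Int) - 2).toNat - (1 : Int).toNat = xs.length - 3 := by omega
      rw [h2, h1, take_drop_map_range _ _ _ (by omega)]
    rcases hpre with hpos | h4' | hneg
    · -- positive width: each recorded window is A's padded prefix
      obtain ⟨m, hm⟩ : ∃ m : Nat, msl = (m : Nat) := ⟨msl.toNat, by omega⟩
      subst hm
      have hm1 : 1 ≤ m := by exact_mod_cast hpos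
      simp only [Int.toNat_natCast] at hslice hval_x ⊢
      refine ⟨?_, train_y_eq xs h4, ?_, trivial, ?_, trivial⟩
      · rw [hslice]
        rw [PySem.List.pyRange_one]
        have : ((xs.length : Int) - 2 - 1).toNat = xs.length - 3 := by omega
        rw [this, List.map_map]
        refine List.map_congr_left fun k hk => ?_
        rw [List.mem_range] at hk
        simp only [Function.comp]
        have ec : ((1 : Int) + (k : Int)) = (((1 + k : Nat)) : Int) := by omega
        rw [ec, PySem.List.slice_to_natCast, pad_eq_winf xs m (1 + k) hm1 (by omega)]
      · rw [e2, PySem.List.slice_to_natCast, pad_eq_winf xs m (xs.length - 2) hm1 (by omega),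
          hval_x (xs.length - 2) (by omega)]
      · rw [e1, PySem.List.slice_to_natCast, pad_eq_winf xs m (xs.length - 1) hm1 (by omega),
          hval_x (xs.length - 1) (by omega)]
    · omega
    · -- width ≤ 1-n: all of A's padded prefixes and all of B's windows are empty
      have hwinf : ∀ i : Nat, winf xs msl.toNat i = [] := by
        intro i
        unfold winf
        rw [Int.toNat_of_nonpos (by omega)]
        simp
      refine ⟨?_, train_y_eq xs h4, ?_, trivial, ?_, trivial⟩
      · rw [hslice]
        have hA : (List.map (fun t => pad_sequence (PySem.List.slice xs none (some t)) msl)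
            (PySem.List.pyRange 1 ((xs.length : Int) - 2) 1))
            = List.replicate (xs.length - 3) ([] : List Int) := by
          have hmem : ∀ b ∈ List.map (fun t => pad_sequence (PySem.List.slice xs none (some t)) msl)
              (PySem.List.pyRange 1 ((xs.length : Int) - 2) 1), b = ([] : List Int) := by
            intro b hb
            rw [List.mem_map] at hb
            obtain ⟨t, htmem, rfl⟩ := hb
            rw [PySem.List.mem_pyRange_one] at htmem
            obtain ⟨k, rfl⟩ : ∃ k : Nat, t = (k : Nat) := ⟨t.toNat, by omega⟩
            rw [PySem.List.slice_to_natCast, padA_empty xs msl k (by omega) (by omega) (by omega)]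
          rw [List.eq_replicate_of_mem hmem]
          congr 1
          simp [PySem.List.length_pyRange_one]
          omega
        have hB : List.map (fun k => winf xs msl.toNat (1 + k)) (List.range (xs.length - 3))
            = List.replicate (xs.length - 3) ([] : List Int) := by
          have hmem : ∀ b ∈ List.map (fun k => winf xs msl.toNat (1 + k)) (List.range (xs.length - 3)),
              b = ([] : List Int) := by
            intro b hb
            rw [List.mem_map] at hb
            obtain ⟨k, _, rfl⟩ := hb
            exact hwinf _
          rw [List.eq_replicate_of_mem hmem]
          congr 1
          simp
        rw [hA, hB]
      · rw [e2, PySem.List.slice_to_natCast,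
          padA_empty xs msl (xs.length - 2) (by omega) (by omega) (by omega),
          hval_x (xs.length - 2) (by omega), hwinf]
      · rw [e1, PySem.List.slice_to_natCast,
          padA_empty xs msl (xs.length - 1) (by omega) (by omega) (by omega),
          hval_x (xs.length - 1) (by omega), hwinf]

-- Inside D_ the two programs disagree everywhere: A's test sample is a nonempty
-- truncated prefix of length n-1+max_seq_len ≥ 1 while B's rolling window is empty.
theorem build_samples_ne (xs : List Int) (msl : Int) (hD : D_build_samples_py xs msl) :
    build_samples_py xs msl ≠ build_samples_py_alt xs msl := by
  obtain ⟨hn, h0, h2n⟩ := hD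
  have h4 : ¬ (xs.length : Int) < 4 := by omega
  simp only [build_samples_py, build_samples_py_alt, if_neg h4]
  rw [xsL_eq]
  intro heq
  simp only [Prod.mk.injEq, List.cons.injEq, and_true] at heq
  have htest := heq.2.2.2.2
  have e1 : ((xs.length : Int) - 1) = ((xs.length - 1 : Nat) : Int) := by omega
  have hB : PySem.List.pyGetD ((List.range xs.length).map (fun i => winf xs msl.toNat i))
      ((xs.length : Int) - 1) [] = [] := by
    rw [e1, PySem.List.pyGetD_natCast, List.getD_eq_getElem?_getD, List.getElem?_map,
      List.getElem?_range (by omega)]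
    unfold winf
    rw [Int.toNat_of_nonpos (by omega)]
    simp
  rw [hB, e1, PySem.List.slice_to_natCast] at htest
  have hlen : (xs.take (xs.length - 1)).length = xs.length - 1 := by
    simp [List.length_take]
  have hAlen : (pad_sequence (xs.take (xs.length - 1)) msl).length ≠ 0 := by
    simp only [pad_sequence, hlen]
    rw [if_pos (by omega), PySem.List.slice_from _ (by omega)]
    have htn : ((-msl).toNat : Int) = -msl := Int.toNat_of_nonneg (by omega)
    simp [List.length_drop, List.length_take, PySem.List.pyRepeat_singleton]
    omega
  rw [htest] at hAlen
  simp at hAlen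

-- ===== VERDICT (by name: the statement is the Claim_ definition above) =====
theorem build_samples_py_spec : Claim_unchanged_build_samples_py := by
  intro user_items max_seq_len _ hnd
  refine build_samples_eq user_items max_seq_len ?_
  unfold D_build_samples_py at hnd
  by_cases h1 : 1 ≤ max_seq_len
  · exact Or.inl h1
  · by_cases h2 : (user_items.length : Int) < 4
    · exact Or.inr (Or.inl h2)
    · refine Or.inr (Or.inr ?_)
      by_cases h3 : max_seq_len + (user_items.length : Int) ≤ 1
      · exact h3
      · exact absurd ⟨by omega, by omega, by omega⟩ hnd

theorem build_samples_py_changed : Claim_changed_build_samples_py := by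
  unfold Claim_changed_build_samples_py
  letI i2 : DecidableEq (List (List Int) × List Int) := instDecidableEqProd
  letI i3 : DecidableEq (List Int × List (List Int) × List Int) := instDecidableEqProd
  letI i4 : DecidableEq (List (List Int) × List Int × List (List Int) × List Int) := instDecidableEqProd
  letI i5 : DecidableEq (List Int × List (List Int) × List Int × List (List Int) × List Int) := instDecidableEqProd
  letI i6 : DecidableEq (List (List Int) × List Int × List (List Int) × List Int × List (List Int) × List Int) := instDecidableEqProd
  exact ⟨by decide, by decide, by decide, by decide, by decide⟩

theorem build_samples_py_tight : Claim_exact_build_samples_py :=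
  fun user_items max_seq_len _ hD => build_samples_ne user_items max_seq_len hD
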